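-- pv_equiv track=rewrite | github.com/bartergit/barter-lang | src/i0/barter.py | clear_line
-- ===== SOURCE A (Python) =====
-- def clear_line(line):
--     tokens = []
--     for ind, line_part in enumerate(line.split("'")):
--         if ind % 2 == 0:
--             tokens += line_part.split()
--         else:
--             tokens += ["'" + line_part + "'"]
--     return tokens[:tokens.index("//")] if "//" in tokens else tokens
-- ===== SOURCE B (Python) =====
-- def clear_line(line):
--     # single-pass character scanner; stops as soon as a top-level '//' word is seen
--     tokens = []
--     buf = []
--     in_quote = False
--     for ch in line:
--         if in_quote:
--             if ch == "'":
--                 tokens.append("'" + "".join(buf) + "'")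
--                 buf = []
--                 in_quote = False
--             else:
--                 buf.append(ch)
--         elif ch == "'":
--             w = "".join(buf)
--             buf = []
--             if w == "//":
--                 return tokens
--             if w:
--                 tokens.append(w)
--             in_quote = True
--         elif ch.isspace():
--             w = "".join(buf)
--             buf = []
--             if w == "//":
--                 return tokens
--             if w:
--                 tokens.append(w)
--         else:
--             buf.append(ch)
--     if in_quote:
--         tokens.append("'" + "".join(buf) + "'")
--     else:
--         w = "".join(buf)
--         if w and w != "//":
--             tokens.append(w)
--     return tokens
-- ===== Notes on version B (the rewrite author's own statement) =====
-- stated objective: alternative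
-- what changed: Replaces split-on-quote + enumerate-parity + whitespace-split + post-hoc truncation at the comment marker with a single-pass character scanner that maintains an in_quote flag and a word buffer and returns early when a top-level comment-marker word is flushed.
import Mathlib
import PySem

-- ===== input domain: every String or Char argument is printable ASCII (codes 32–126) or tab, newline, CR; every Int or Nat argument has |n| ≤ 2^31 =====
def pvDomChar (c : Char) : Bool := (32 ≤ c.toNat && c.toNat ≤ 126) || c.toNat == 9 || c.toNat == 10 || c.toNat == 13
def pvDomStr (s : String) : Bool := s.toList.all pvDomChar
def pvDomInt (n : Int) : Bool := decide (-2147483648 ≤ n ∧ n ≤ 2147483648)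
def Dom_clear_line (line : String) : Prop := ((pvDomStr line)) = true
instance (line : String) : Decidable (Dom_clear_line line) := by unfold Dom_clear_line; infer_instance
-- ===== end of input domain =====

-- B is a single-pass character scanner (in_quote flag + word buffer, early return at a top-level "//" word)
-- replacing A's split-on-quote / parity / whitespace-split / post-hoc truncation pipeline; same result, same cost.

-- ===== PORT A =====
def clear_line (line : String) : List String :=
  let parts := (PySem.Str.split? line "'").getD []
  let tokens := (PySem.List.enumerate parts).foldl
    (fun toks ip =>
      if PySem.Int.mod ip.1 2 == 0 then toks ++ PySem.Str.split₀ ip.2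
      else toks ++ [String.ofList ('\'' :: ip.2.toList ++ ['\''])]) []
  match PySem.List.index? tokens "//" with
  | some i => PySem.List.slice tokens none (some (i : Int))
  | none => tokens

-- ===== PORT B =====
-- scanner loop of Source B: buf is the current word (reversed), inq the in_quote flag, toks the tokens so far
def scanGo : List Char → List Char → Bool → List String → List String
  | [], buf, inq, toks =>
    if inq then toks ++ [String.ofList ('\'' :: buf.reverse ++ ['\''])]
    else
      let w := buf.reverse
      if w = ['/', '/'] then toks
      else if w = [] then toks
      else toks ++ [String.ofList w]
  | c :: cs, buf, true, toks =>
    if c = '\'' then scanGo cs [] false (toks ++ [String.ofList ('\'' :: buf.reverse ++ ['\''])])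
    else scanGo cs (c :: buf) true toks
  | c :: cs, buf, false, toks =>
    if c = '\'' then
      let w := buf.reverse
      if w = ['/', '/'] then toks
      else scanGo cs [] true (if w = [] then toks else toks ++ [String.ofList w])
    else if PySem.Chars.isspace c then
      let w := buf.reverse
      if w = ['/', '/'] then toks
      else scanGo cs [] false (if w = [] then toks else toks ++ [String.ofList w])
    else scanGo cs (c :: buf) false toks

def clear_line_alt (line : String) : List String := scanGo line.toList [] false []

-- ===== PRECONDITION & SPEC =====
def Spec_clear_line (line : String) (out : List String) : Prop := out = clear_line_alt line
instance (line : String) (out : List String) : Decidable (Spec_clear_line line out) := by unfold Spec_clear_line; infer_instance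

-- ===== CLAIM (what is proved, stated in full; the proofs are below) =====
def Claim_equal_clear_line : Prop := ∀ (line : String), Dom_clear_line line → Spec_clear_line line (clear_line line)

-- ===== LEMMAS AND PROOFS =====

-- proof-side helpers on List Char
def flushC (buf : List Char) : List (List Char) := if buf = [] then [] else [buf.reverse]

def wrapC (p : List Char) : List Char := '\'' :: p ++ ['\'']

-- whitespace split with a pending (in-order) current word
def wsP : List Char → List Char → List (List Char)
  | [], pend => if pend = [] then [] else [pend]
  | c :: cs, pend =>
    if PySem.Chars.isspace c then (if pend = [] then wsP cs [] else pend :: wsP cs [])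
    else wsP cs (pend ++ [c])

-- split on a single quote character
def sqC : List Char → List (List Char)
  | [] => [[]]
  | c :: cs =>
    if c = '\'' then [] :: sqC cs
    else match sqC cs with
      | [] => [[c]]
      | p :: ps => (c :: p) :: ps

-- A's alternating tokenisation of the quote-split parts
def altC : Bool → List (List Char) → List (List Char)
  | _, [] => []
  | b, p :: ps => (if b then wsP p [] else [wrapC p]) ++ altC (!b) ps

-- truncate at the first "//" token
def truncC : List (List Char) → List (List Char)
  | [] => []
  | t :: ts => if t = ['/', '/'] then [] else t :: truncC ts

-- untruncated scanner tokens (outside / inside a quote), buf reversed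
mutual
def outTok : List Char → List Char → List (List Char)
  | [], buf => flushC buf
  | c :: cs, buf =>
    if c = '\'' then flushC buf ++ inTok cs []
    else if PySem.Chars.isspace c then flushC buf ++ outTok cs []
    else outTok cs (c :: buf)
def inTok : List Char → List Char → List (List Char)
  | [], buf => [wrapC buf.reverse]
  | c :: cs, buf =>
    if c = '\'' then wrapC buf.reverse :: outTok cs []
    else inTok cs (c :: buf)
end

lemma sqC_ne_nil (cs : List Char) : sqC cs ≠ [] := by
  cases cs with
  | nil => simp [sqC]
  | cons c cs =>
    simp only [sqC]
    split
    · simp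
    · split <;> simp

lemma splitOn_go_eq : ∀ (fuel : Nat) (cs cur : List Char) (acc : List (List Char)),
    cs.length < fuel →
    PySem.Chars.splitOn.go ['\''] fuel cs cur acc =
      acc.reverse ++ (match sqC cs with
        | [] => [cur.reverse]
        | p :: ps => (cur.reverse ++ p) :: ps) := by
  intro fuel
  induction fuel with
  | zero => intro cs cur acc h; omega
  | succ f ih =>
    intro cs cur acc h
    cases cs with
    | nil => simp [PySem.Chars.splitOn.go, sqC]
    | cons c rest =>
      simp only [PySem.Chars.splitOn.go]
      by_cases hc : c = '\''
      · subst hc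
        simp only [List.isPrefixOf, BEq.rfl, Bool.true_and, if_pos]
        rw [show List.drop ['\''].length ('\'' :: rest) = rest from rfl]
        rw [ih rest [] _ (by simpa using Nat.lt_of_succ_lt_succ h)]
        rcases h' : sqC rest with _ | ⟨p, ps⟩
        · exact absurd h' (sqC_ne_nil rest)
        · simp [sqC, h']
      · have : (['\''].isPrefixOf (c :: rest)) = false := by
          simp [List.isPrefixOf]
          exact fun hq => absurd hq.symm hc
        rw [this]
        simp only [Bool.false_eq_true, if_false]
        rw [ih rest (c :: cur) acc (by simpa using Nat.lt_of_succ_lt_succ h)]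
        rcases h' : sqC rest with _ | ⟨p, ps⟩
        · exact absurd h' (sqC_ne_nil rest)
        · simp [sqC, hc, h']

lemma splitQ_eq (cs : List Char) : PySem.Chars.splitOn cs ['\''] = sqC cs := by
  unfold PySem.Chars.splitOn
  rw [splitOn_go_eq (cs.length + 1) cs [] [] (by omega)]
  rcases h : sqC cs with _ | ⟨p, ps⟩
  · exact absurd h (sqC_ne_nil cs)
  · simp

lemma split0_go_eq : ∀ (cs cur : List Char) (acc : List (List Char)),
    PySem.Chars.split₀.go cs cur acc = acc.reverse ++ wsP cs cur.reverse := by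
  intro cs
  induction cs with
  | nil =>
    intro cur acc
    simp only [PySem.Chars.split₀.go, wsP, List.isEmpty_iff, List.reverse_eq_nil_iff]
    split <;> simp_all
  | cons c rest ih =>
    intro cur acc
    simp only [PySem.Chars.split₀.go, wsP, List.isEmpty_iff, List.reverse_eq_nil_iff]
    by_cases hs : PySem.Chars.isspace c = true
    · by_cases hcur : cur = []
      · simp [hs, hcur, ih]
      · simp [hs, hcur, ih, List.reverse_eq_nil_iff]
    · simp only [hs, Bool.false_eq_true, if_false]
      rw [ih (c :: cur) acc]
      simp
lemma split0_eq (cs : List Char) : PySem.Chars.split₀ cs = wsP cs [] := by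
  unfold PySem.Chars.split₀
  rw [split0_go_eq]
  simp

lemma parity_flip (n : Int) :
    (PySem.Int.mod (n + 1) 2 == 0) = !(PySem.Int.mod n 2 == 0) := by
  rw [PySem.Int.mod_eq_emod_of_pos (by norm_num), PySem.Int.mod_eq_emod_of_pos (by norm_num)]
  rcases Int.emod_two_eq n with h | h
  · have h2 : (n + 1) % 2 = 1 := by omega
    simp [h, h2]
  · have h2 : (n + 1) % 2 = 0 := by omega
    simp [h, h2]

lemma enumFold : ∀ (pl : List (List Char)) (n : Int) (acc : List String) (b : Bool),
    (PySem.Int.mod n 2 == 0) = b →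
    (PySem.List.enumerate (pl.map String.ofList) n).foldl
      (fun toks ip =>
        if PySem.Int.mod ip.1 2 == 0 then toks ++ PySem.Str.split₀ ip.2
        else toks ++ [String.ofList ('\'' :: ip.2.toList ++ ['\''])]) acc
    = acc ++ (altC b pl).map String.ofList := by
  intro pl
  induction pl with
  | nil => intro n acc b hb; simp [PySem.List.enumerate, altC]
  | cons p ps ih =>
    intro n acc b hb
    simp only [List.map_cons, PySem.List.enumerate, List.foldl_cons, hb]
    rw [ih (n + 1) _ (!b) (by rw [parity_flip, hb])]
    cases b with
    | true =>
      simp only [if_pos rfl, altC]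
      rw [PySem.Str.split₀, String.toList_ofList, split0_eq]
      simp [List.append_assoc]
    | false =>
      simp only [Bool.false_eq_true, if_false, altC, wrapC]
      rw [String.toList_ofList]
      simp [List.append_assoc]

lemma truncS : ∀ (tl : List (List Char)),
    (match PySem.List.index? (tl.map String.ofList) "//" with
     | some i => PySem.List.slice (tl.map String.ofList) none (some (i : Int))
     | none => tl.map String.ofList)
    = (truncC tl).map String.ofList := by
  intro tl
  induction tl with
  | nil => simp [PySem.List.index?, truncC]
  | cons t ts ih =>
    by_cases ht : t = ['/', '/']
    · subst ht
      have : String.ofList ['/', '/'] = "//" := by decide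
      simp [PySem.List.index?, List.idxOf?_cons, this, truncC, PySem.List.slice]
    · have hne : (String.ofList t == "//") = false := by
        simp only [beq_eq_false_iff_ne, ne_eq]
        intro h
        exact ht (by simpa using congrArg String.toList h)
      simp only [List.map_cons, PySem.List.index?, List.idxOf?_cons, hne, Bool.false_eq_true,
        if_false, truncC, ht, List.map]
      rcases hidx : List.idxOf? "//" (ts.map String.ofList) with _ | j
      · simpa [PySem.List.index?, hidx] using ih
      · simp only [Option.map_some]
        rw [PySem.List.slice_to _ (by positivity)]
        have hih := ih
        simp only [PySem.List.index?, hidx] at hih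
        rw [PySem.List.slice_to _ (by positivity)] at hih
        have h1 : ((j + 1 : Nat) : Int).toNat = j + 1 := by omega
        have h2 : ((j : Nat) : Int).toNat = j := by omega
        rw [h1]; rw [h2] at hih
        simp [List.take_succ_cons, hih]

lemma wrapC_ne (w : List Char) : wrapC w ≠ ['/', '/'] := by
  simp [wrapC]

lemma scan_eq : ∀ (cs : List Char),
    (∀ buf toks, scanGo cs buf false toks = toks ++ (truncC (outTok cs buf)).map String.ofList)
    ∧ (∀ buf toks, scanGo cs buf true toks = toks ++ (truncC (inTok cs buf)).map String.ofList) := by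
  intro cs
  induction cs with
  | nil =>
    constructor
    · intro buf toks
      simp only [scanGo, outTok, flushC]
      by_cases hb : buf = []
      · simp [hb, truncC]
      · have hr : buf.reverse ≠ [] := by simpa [List.reverse_eq_nil_iff] using hb
        by_cases hw : buf.reverse = ['/', '/'] <;> simp [hb, hw, hr, truncC]
    · intro buf toks
      simp [scanGo, inTok, truncC, wrapC_ne buf.reverse, wrapC]
  | cons c rest ih =>
    obtain ⟨ihOut, ihIn⟩ := ih
    constructor
    · intro buf toks
      simp only [scanGo, outTok]
      by_cases hc : c = '\''
      · simp only [hc, if_pos rfl]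
        by_cases hb : buf = []
        · simp [hb, truncC, flushC, ihIn]
        · have hr : buf.reverse ≠ [] := by simpa [List.reverse_eq_nil_iff] using hb
          by_cases hw : buf.reverse = ['/', '/']
          · simp [hb, hw, truncC, flushC]
          · simp [hb, hw, hr, truncC, flushC, ihIn]
      · simp only [hc, if_false]
        by_cases hs : PySem.Chars.isspace c = true
        · simp only [hs, if_pos rfl]
          by_cases hb : buf = []
          · simp [hb, truncC, flushC, ihOut]
          · have hr : buf.reverse ≠ [] := by simpa [List.reverse_eq_nil_iff] using hb
            by_cases hw : buf.reverse = ['/', '/']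
            · simp [hb, hw, truncC, flushC]
            · simp [hb, hw, hr, truncC, flushC, ihOut]
        · simp [hs, ihOut]
    · intro buf toks
      simp only [scanGo, inTok]
      by_cases hc : c = '\''
      · simp [hc, truncC, wrapC_ne buf.reverse, ihOut, wrapC]
      · simp [hc, ihIn]

lemma tok_eq : ∀ (cs : List Char) (p : List Char) (ps : List (List Char)), sqC cs = p :: ps →
    (∀ buf, outTok cs buf = wsP p buf.reverse ++ altC false ps)
    ∧ (∀ buf, inTok cs buf = wrapC (buf.reverse ++ p) :: altC true ps) := by
  intro cs
  induction cs with
  | nil =>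
    intro p ps h
    simp only [sqC, List.cons.injEq] at h
    obtain ⟨hp, hps⟩ := h
    subst hp; subst hps
    constructor
    · intro buf
      by_cases hb : buf = [] <;>
        simp [outTok, wsP, altC, flushC, hb, List.reverse_eq_nil_iff]
    · intro buf; simp [inTok, altC]
  | cons c rest ih =>
    intro p ps h
    by_cases hc : c = '\''
    · subst hc
      rw [show sqC ('\'' :: rest) = [] :: sqC rest by simp [sqC]] at h
      injection h with hp hps
      subst hp; subst hps
      rcases h' : sqC rest with _ | ⟨p', ps'⟩
      · exact absurd h' (sqC_ne_nil rest)
      · obtain ⟨ihOut, ihIn⟩ := ih p' ps' h'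
        constructor
        · intro buf
          simp only [outTok, if_pos rfl, ihIn [], wsP, altC, h', flushC,
            List.reverse_eq_nil_iff, List.reverse_nil, List.nil_append]
          split <;> simp_all
        · intro buf
          simp [inTok, ihOut [], altC, h', wsP]
    · rcases h' : sqC rest with _ | ⟨p', ps'⟩
      · exact absurd h' (sqC_ne_nil rest)
      · rw [show sqC (c :: rest) = (c :: p') :: ps' by simp [sqC, hc, h']] at h
        injection h with hp hps
        subst hp; subst hps
        obtain ⟨ihOut, ihIn⟩ := ih p' ps' h'
        constructor
        · intro buf
          simp only [outTok, hc, if_false]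
          by_cases hs : PySem.Chars.isspace c = true
          · by_cases hb : buf = [] <;>
              simp [hs, ihOut [], wsP, flushC, hb, List.reverse_eq_nil_iff]
          · simp only [hs, Bool.false_eq_true, if_false, ihOut (c :: buf), wsP, hs]
            simp
        · intro buf
          simp only [inTok, hc, if_false, ihIn (c :: buf)]
          simp

lemma clear_line_eq (line : String) :
    clear_line line = (truncC (altC true (sqC line.toList))).map String.ofList := by
  have hparts : (PySem.Str.split? line "'").getD [] = (sqC line.toList).map String.ofList := by
    simp only [PySem.Str.split?, PySem.Chars.split?, show "'".toList = ['\''] from rfl]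
    simp [splitQ_eq]
  simp only [clear_line, hparts]
  rw [enumFold (sqC line.toList) 0 [] true (by decide)]
  simpa using truncS (altC true (sqC line.toList))

lemma clear_line_alt_eq (line : String) :
    clear_line_alt line = (truncC (altC true (sqC line.toList))).map String.ofList := by
  unfold clear_line_alt
  rw [(scan_eq line.toList).1 [] []]
  rcases h : sqC line.toList with _ | ⟨p, ps⟩
  · exact absurd h (sqC_ne_nil line.toList)
  · rw [((tok_eq line.toList p ps h).1) []]
    simp [altC]

-- ===== VERDICT (by name: the statement is the Claim_ definition above) =====
theorem clear_line_spec : Claim_equal_clear_line := by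
  intro line _
  show clear_line line = clear_line_alt line
  rw [clear_line_eq, clear_line_alt_eq]
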